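-- pv_equiv track=rewrite | github.com/psw42/project-snow-white | project_snow_white/problems/p0001/solution.py | add_numbers_in_alphanumeric_string
-- ===== SOURCE A (Python) =====
-- def add_numbers_in_alphanumeric_string(alphanumeric_string: str) -> int:
--     numbers_sum = 0
--     power = 0
--     for c in reversed(alphanumeric_string):
--         if c.isdigit():
--             if c != '0':
--                 numbers_sum += int(c) * 10 ** power
--             power += 1
--         else:
--             power = 0
--     return numbers_sum
-- ===== SOURCE B (Python) =====
-- def add_numbers_in_alphanumeric_string(alphanumeric_string: str) -> int:
--     # Stage 1: split the string into its maximal digit runs.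
--     runs = []
--     i = 0
--     n = len(alphanumeric_string)
--     while i < n:
--         if alphanumeric_string[i].isdigit():
--             j = i
--             while j < n and alphanumeric_string[j].isdigit():
--                 j += 1
--             runs.append(alphanumeric_string[i:j])
--             i = j
--         else:
--             i += 1
--     # Stage 2: convert each run and sum.
--     return sum(int(run) for run in runs)
-- ===== Notes on version B (the rewrite author's own statement) =====
-- stated objective: idiomatic
-- what changed: Two staged passes: first split the string into its maximal digit runs, then convert each run to an integer and sum them, instead of A's single reversed scan that maintains an explicit power-of-ten counter and adds digit*10**power per digit.
import Mathlib
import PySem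

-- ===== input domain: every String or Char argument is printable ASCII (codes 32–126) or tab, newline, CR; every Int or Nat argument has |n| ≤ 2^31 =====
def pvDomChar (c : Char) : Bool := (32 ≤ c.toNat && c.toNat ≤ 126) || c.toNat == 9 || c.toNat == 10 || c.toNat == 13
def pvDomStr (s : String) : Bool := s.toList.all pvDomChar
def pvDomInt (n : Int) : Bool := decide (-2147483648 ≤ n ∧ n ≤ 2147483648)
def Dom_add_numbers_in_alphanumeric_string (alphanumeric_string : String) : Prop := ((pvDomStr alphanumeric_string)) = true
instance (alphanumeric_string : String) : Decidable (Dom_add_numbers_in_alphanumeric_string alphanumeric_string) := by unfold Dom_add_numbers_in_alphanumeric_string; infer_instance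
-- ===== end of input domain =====

-- B replaces A's single reversed scan with a power-of-ten counter by two staged passes:
-- split the string into its maximal digit runs, then convert each run and sum (idiomatic).

-- ===== PORT A =====
-- Literal port of A: fold over the reversed character list with state (numbers_sum, power).
-- int(c) for the ASCII digit c (the only case the branch reaches on Dom) is (c.toNat - 48 : Int).
def add_numbers_in_alphanumeric_string (alphanumeric_string : String) : Int :=
  (alphanumeric_string.toList.reverse.foldl
    (fun (st : Int × Nat) c =>
      if PySem.Chars.isdigit c then
        (if c ≠ '0' then st.1 + ((c.toNat : Int) - 48) * 10 ^ st.2 else st.1, st.2 + 1)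
      else
        (st.1, 0))
    (0, 0)).1

-- ===== PORT B =====
-- Stage 1 of Source B: the outer while loop over positions; on a digit it runs the inner
-- while loop to the end of the run (takeWhile), appends that slice as a run and resumes
-- after it (dropWhile), on a non-digit it advances one position.
def pvSplitRuns : List Char → List (List Char)
  | [] => []
  | c :: t =>
    if PySem.Chars.isdigit c then
      ((c :: t).takeWhile PySem.Chars.isdigit) :: pvSplitRuns ((c :: t).dropWhile PySem.Chars.isdigit)
    else pvSplitRuns t
termination_by l => l.length
decreasing_by
  · simp only [List.dropWhile_cons, *, if_pos, List.length_cons]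
    exact Nat.lt_succ_of_le (List.length_dropWhile_le _ _)
  · simp

-- Stage 2 of Source B: int(run) for an all-ASCII-digit run, the standard Horner evaluation
-- (exact for such runs: no sign, no spaces, no underscores can occur in a digit run).
def pvIntOfRun (run : List Char) : Int :=
  run.foldl (fun a c => a * 10 + ((c.toNat : Int) - 48)) 0

def add_numbers_in_alphanumeric_string_alt (alphanumeric_string : String) : Int :=
  ((pvSplitRuns alphanumeric_string.toList).map pvIntOfRun).sum

-- ===== PRECONDITION & SPEC =====
def Spec_add_numbers_in_alphanumeric_string (alphanumeric_string : String) (out : Int) : Prop := out = add_numbers_in_alphanumeric_string_alt alphanumeric_string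
instance (alphanumeric_string : String) (out : Int) : Decidable (Spec_add_numbers_in_alphanumeric_string alphanumeric_string out) := by unfold Spec_add_numbers_in_alphanumeric_string; infer_instance

-- ===== CLAIM (what is proved, stated in full; the proofs are below) =====
def Claim_equal_add_numbers_in_alphanumeric_string : Prop := ∀ (alphanumeric_string : String), Dom_add_numbers_in_alphanumeric_string alphanumeric_string → Spec_add_numbers_in_alphanumeric_string alphanumeric_string (add_numbers_in_alphanumeric_string alphanumeric_string)

-- ===== LEMMAS AND PROOFS =====

-- Value of the string processed with a pending run value v (head-first recursion
-- intermediate between the two ports): sum of the embedded numbers.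
def pvRuns (v : Int) : List Char → Int
  | [] => v
  | c :: t =>
      if PySem.Chars.isdigit c then pvRuns (v * 10 + ((c.toNat : Int) - 48)) t
      else v + pvRuns 0 t

-- Length of the leading digit run (A's `power` after consuming the list from the right).
def pvLead : List Char → Nat
  | [] => 0
  | c :: t => if PySem.Chars.isdigit c then pvLead t + 1 else 0

-- The pending run value contributes v·10^(leading run length).
theorem pvRuns_pending (l : List Char) : ∀ v : Int,
    pvRuns v l = v * 10 ^ pvLead l + pvRuns 0 l := by
  induction l with
  | nil => intro v; simp [pvRuns, pvLead]
  | cons c tl ih =>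
      intro v
      by_cases h : PySem.Chars.isdigit c
      · simp only [pvRuns, pvLead, h, if_true]
        rw [ih (v * 10 + ((c.toNat : Int) - 48)), ih ((0 : Int) * 10 + ((c.toNat : Int) - 48))]
        ring
      · simp [pvRuns, pvLead, h]

-- A's right-to-left state is exactly (pvRuns 0 l, pvLead l).
theorem pvA_foldr (l : List Char) :
    l.foldr (fun c (st : Int × Nat) =>
        if PySem.Chars.isdigit c then
          (if c ≠ '0' then st.1 + ((c.toNat : Int) - 48) * 10 ^ st.2 else st.1, st.2 + 1)
        else (st.1, 0)) (0, 0)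
    = (pvRuns 0 l, pvLead l) := by
  induction l with
  | nil => simp [pvRuns, pvLead]
  | cons c tl ih =>
      rw [List.foldr_cons, ih]
      by_cases h : PySem.Chars.isdigit c
      · by_cases h0 : c = '0'
        · subst h0
          rw [if_pos h, if_neg (by simp), Prod.mk.injEq, pvLead, if_pos h]
          have hr : pvRuns 0 ('0' :: tl) = pvRuns 0 tl := by
            have h48 : (('0'.toNat : Int) - 48) = 0 := by decide
            norm_num [pvRuns, h, h48]
          exact ⟨hr.symm, rfl⟩
        · rw [if_pos h, if_pos h0]
          have hr : pvRuns 0 (c :: tl) = pvRuns (0 * 10 + ((c.toNat : Int) - 48)) tl := by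
            simp [pvRuns, h]
          rw [hr, pvRuns_pending tl (0 * 10 + ((c.toNat : Int) - 48)), Prod.mk.injEq,
            pvLead, if_pos h]
          exact ⟨by ring, rfl⟩
      · simp [pvRuns, pvLead, h]

-- Consuming an all-digit prefix Horner-accumulates it into the pending value.
theorem pvRuns_digit_prefix (r : List Char) : ∀ (t : List Char) (v : Int),
    (∀ c ∈ r, PySem.Chars.isdigit c = true) →
    pvRuns v (r ++ t) = pvRuns (r.foldl (fun a c => a * 10 + ((c.toNat : Int) - 48)) v) t := by
  induction r with
  | nil => intro t v _; rfl
  | cons c rt ih =>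
      intro t v hall
      have hc : PySem.Chars.isdigit c = true := hall c (by simp)
      simp only [List.cons_append, pvRuns, hc, if_true, List.foldl_cons]
      exact ih t _ (fun x hx => hall x (by simp [hx]))

-- B's run-sum equals pvRuns 0 (strong induction on length).
theorem pvB_sum (n : Nat) : ∀ l : List Char, l.length ≤ n →
    ((pvSplitRuns l).map pvIntOfRun).sum = pvRuns 0 l := by
  induction n with
  | zero =>
      intro l hl
      have : l = [] := List.eq_nil_of_length_eq_zero (Nat.le_zero.mp hl)
      subst this; simp [pvSplitRuns, pvRuns]
  | succ n ih =>
      intro l hl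
      match l with
      | [] => simp [pvSplitRuns, pvRuns]
      | c :: t =>
        by_cases h : PySem.Chars.isdigit c
        · rw [pvSplitRuns]
          rw [if_pos h]
          set r := (c :: t).takeWhile PySem.Chars.isdigit with hr
          set rest := (c :: t).dropWhile PySem.Chars.isdigit with hrest
          have hsplit : r ++ rest = c :: t := List.takeWhile_append_dropWhile
          have hall : ∀ x ∈ r, PySem.Chars.isdigit x = true := fun x hx =>
            List.mem_takeWhile_imp hx
          have hrestlen : rest.length ≤ n := by
            have : rest.length < (c :: t).length := by
              rw [hrest, List.dropWhile_cons, if_pos h, List.length_cons]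
              exact Nat.lt_succ_of_le (List.length_dropWhile_le _ _)
            omega
          have hrestval : pvRuns (pvIntOfRun r) rest = pvIntOfRun r + pvRuns 0 rest := by
            match hrs : rest with
            | [] => simp [pvRuns]
            | d :: ts =>
              have hd : PySem.Chars.isdigit d = false := by
                have := List.head?_dropWhile_not PySem.Chars.isdigit (c :: t)
                rw [← hrest] at this
                simpa using this
              simp [pvRuns, hd]
          have hmain : pvRuns 0 (c :: t) = pvIntOfRun r + pvRuns 0 rest := by
            rw [← hsplit, pvRuns_digit_prefix r rest 0 hall, ← pvIntOfRun, hrestval]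
          rw [List.map_cons, List.sum_cons, ih rest hrestlen, hmain]
        · rw [pvSplitRuns, if_neg h]
          have : pvRuns 0 (c :: t) = pvRuns 0 t := by simp [pvRuns, h]
          rw [this, ih t (by simpa using Nat.le_of_succ_le_succ hl)]

-- ===== VERDICT (by name: the statement is the Claim_ definition above) =====
theorem add_numbers_in_alphanumeric_string_spec : Claim_equal_add_numbers_in_alphanumeric_string := by
  intro s _
  show add_numbers_in_alphanumeric_string s = add_numbers_in_alphanumeric_string_alt s
  unfold add_numbers_in_alphanumeric_string add_numbers_in_alphanumeric_string_alt
  rw [List.foldl_reverse, pvB_sum s.toList.length s.toList le_rfl]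
  have hA := pvA_foldr s.toList
  simp only [show (fun c (st : Int × Nat) =>
        if PySem.Chars.isdigit c then
          (if c ≠ '0' then st.1 + ((c.toNat : Int) - 48) * 10 ^ st.2 else st.1, st.2 + 1)
        else (st.1, 0)) = (fun x y =>
      (fun (st : Int × Nat) c =>
        if PySem.Chars.isdigit c then
          (if c ≠ '0' then st.1 + ((c.toNat : Int) - 48) * 10 ^ st.2 else st.1, st.2 + 1)
        else (st.1, 0)) y x) from rfl] at hA
  rw [hA]
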